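-- pv_equiv track=rewrite | github.com/bedwards/Nadir_Singleton | python/nadir-lyric-g2p/src/nadir_g2p/lexicon.py | _fallback_spell_out
-- ===== SOURCE A (Python) =====
-- _DIGRAPHS: dict[str, list[str]] = {
--     "sh": ["S"],
--     "ch": ["tS"],
--     "th": ["T"],
--     "ph": ["f"],
--     "wh": ["w"],
--     "ng": ["N"],
--     "qu": ["k", "w"],
-- }
--
-- _SINGLE: dict[str, list[str]] = {
--     "a": ["{"], "e": ["E"], "i": ["I"], "o": ["O"], "u": ["V"],
--     "b": ["b"], "c": ["k"], "d": ["d"], "f": ["f"], "g": ["g"],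
--     "h": ["h"], "j": ["dZ"], "k": ["k"], "l": ["l"], "m": ["m"],
--     "n": ["n"], "p": ["p"], "q": ["k"], "r": ["r"], "s": ["s"],
--     "t": ["t"], "v": ["v"], "w": ["w"], "x": ["k", "s"], "y": ["j"],
--     "z": ["z"],
-- }
--
-- _VOWELS = set("aeiouy")
--
-- _CONSONANTS = set("bcdfghjklmnpqrstvwxz")
--
-- def _strip_silent_e(word: str) -> str:
--     """Drop a trailing silent ``e`` after a CVC pattern (e.g. ``make``, ``hope``).
--
--     We keep the ``e`` when the word is too short or when the penultimate
--     letter is already a vowel (``see``, ``toe``) — those ``e`` vowels are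
--     pronounced.
--     """
--     if len(word) < 4 or not word.endswith("e"):
--         return word
--     c3, v2, c1, _ = word[-4], word[-3], word[-2], word[-1]
--     if c3 in _CONSONANTS and v2 in _VOWELS and c1 in _CONSONANTS:
--         return word[:-1]
--     return word
--
-- def _fallback_spell_out(word: str, voice: str) -> list[str]:
--     """Crude letter-to-sound fallback for OOV words.
--
--     Recognises common English digraphs (``sh``, ``ch``, ``th``, ``ph``, ``wh``,
--     ``ng``, ``qu``) and drops a trailing silent ``e`` after a CVC pattern.
--     """
--     w = _strip_silent_e(word)
--     out: list[str] = []
--     i = 0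
--     while i < len(w):
--         pair = w[i:i + 2]
--         if pair in _DIGRAPHS:
--             out.extend(_DIGRAPHS[pair])
--             i += 2
--             continue
--         out.extend(_SINGLE.get(w[i], []))
--         i += 1
--     return out
-- ===== SOURCE B (Python) =====
-- import re
--
-- # parallel tables: markers \x01..\x07 stand for the digraphs sh ch th ph wh ng qu
-- _KEYS = "\x01\x02\x03\x04\x05\x06\x07abcdefghijklmnopqrstuvwxyz"
-- _VALS = "S|tS|T|f|w|N|k w|{|b|k|d|E|f|g|h|I|dZ|k|l|m|n|O|p|k|r|s|t|V|v|w|k s|j|z".split("|")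
--
-- # silent final e after consonant-vowel-consonant; (?s) so any prefix is allowed
-- _SILENT_E = re.compile(r"(?s).*[bcdfghjklmnpqrstvwxz][aeiouy][bcdfghjklmnpqrstvwxz]e")
--
--
-- def _fallback_spell_out(word: str, voice: str) -> list[str]:
--     w = word[:-1] if _SILENT_E.fullmatch(word) else word
--     # staged passes: collapse each digraph everywhere to its 1-char marker
--     # (digraph occurrences never overlap: no digraph starts with h, g or u)
--     for i, dg in enumerate(("sh", "ch", "th", "ph", "wh", "ng", "qu")):
--         w = w.replace(dg, chr(i + 1))
--     out: list[str] = []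
--     for ch in w:
--         j = _KEYS.find(ch)
--         if j >= 0:
--             out += _VALS[j].split()
--     return out
-- ===== Notes on version B (the rewrite author's own statement) =====
-- stated objective: alternative
-- what changed: Replaced A's single index-advancing greedy scan over two dicts by staged global passes: each digraph is first collapsed everywhere to a one-char marker via str.replace (correct because no digraph starts with h, g or u, so digraph occurrences never overlap), then one find/table lookup per remaining character emits the phonemes; the silent-e CVC check became a regex fullmatch.
import Mathlib
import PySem

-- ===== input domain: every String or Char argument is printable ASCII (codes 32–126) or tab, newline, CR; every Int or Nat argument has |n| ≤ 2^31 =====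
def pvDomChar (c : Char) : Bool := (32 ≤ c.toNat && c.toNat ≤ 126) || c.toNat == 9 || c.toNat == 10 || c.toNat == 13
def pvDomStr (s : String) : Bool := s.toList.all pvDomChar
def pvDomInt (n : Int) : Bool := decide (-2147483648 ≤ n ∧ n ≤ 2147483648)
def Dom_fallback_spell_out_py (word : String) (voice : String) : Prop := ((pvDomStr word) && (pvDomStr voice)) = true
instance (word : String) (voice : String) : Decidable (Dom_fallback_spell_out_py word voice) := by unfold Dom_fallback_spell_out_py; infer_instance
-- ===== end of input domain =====

-- B replaces A's single index-advancing scan over two dicts by staged global passes: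
-- each digraph is first collapsed everywhere to a 1-char marker via str.replace (digraph
-- occurrences never overlap), then one table lookup per char emits the phonemes (alternative; same cost).


-- ===== PORT A =====
-- A's dicts keyed by str; ported over the word's code points, so keys are List Char
def aDigraphs : PySem.Dict (List Char) (List String) := PySem.Dict.ofList
  [(['s','h'], ["S"]), (['c','h'], ["tS"]), (['t','h'], ["T"]), (['p','h'], ["f"]),
   (['w','h'], ["w"]), (['n','g'], ["N"]), (['q','u'], ["k", "w"])]

def aSingle : PySem.Dict (List Char) (List String) := PySem.Dict.ofList
  [(['a'], ["{"]), (['e'], ["E"]), (['i'], ["I"]), (['o'], ["O"]), (['u'], ["V"]),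
   (['b'], ["b"]), (['c'], ["k"]), (['d'], ["d"]), (['f'], ["f"]), (['g'], ["g"]),
   (['h'], ["h"]), (['j'], ["dZ"]), (['k'], ["k"]), (['l'], ["l"]), (['m'], ["m"]),
   (['n'], ["n"]), (['p'], ["p"]), (['q'], ["k"]), (['r'], ["r"]), (['s'], ["s"]),
   (['t'], ["t"]), (['v'], ["v"]), (['w'], ["w"]), (['x'], ["k", "s"]), (['y'], ["j"]),
   (['z'], ["z"])]

def aVowels : PySem.Set Char := PySem.Set.ofList "aeiouy".toList
def aConsonants : PySem.Set Char := PySem.Set.ofList "bcdfghjklmnpqrstvwxz".toList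

-- _strip_silent_e, step for step on the code points
def aStrip (cs : List Char) : List Char :=
  if cs.length < 4 ∨ PySem.Chars.endswith cs ['e'] = false then cs
  else
    match PySem.List.pyGet? cs (-4), PySem.List.pyGet? cs (-3), PySem.List.pyGet? cs (-2) with
    | some c3, some v2, some c1 =>
        if c3 ∈ aConsonants ∧ v2 ∈ aVowels ∧ c1 ∈ aConsonants then
          PySem.List.slice cs none (some (-1))      -- word[:-1]
        else cs
    | _, _, _ => cs                                 -- unreachable when len ≥ 4

-- the while loop: i advances left to right, so it is recursion on the remaining suffix;
-- pair = w[i:i+2] is the first two chars of that suffix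
def aLoop : List Char → List String
  | [] => []
  | c :: rest =>
    let pair := (c :: rest).take 2
    match aDigraphs.get? pair with
    | some ps => ps ++ aLoop (rest.drop 1)          -- i += 2
    | none => aSingle.getD [c] [] ++ aLoop rest     -- i += 1
  termination_by cs => cs.length
  decreasing_by
    · simp only [List.length_cons, List.length_drop]; omega
    · simp only [List.length_cons]; omega

def fallback_spell_out_py (word : String) (voice : String) : List String :=
  aLoop (aStrip word.toList)

-- ===== PORT B =====
-- Source B's parallel tables: _KEYS (markers \x01..\x07 then a..z) and _VALS = "…".split("|")
def bKeys : List Char := "\x01\x02\x03\x04\x05\x06\x07abcdefghijklmnopqrstuvwxyz".toList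

def bVals : List String :=
  match PySem.Str.split? "S|tS|T|f|w|N|k w|{|b|k|d|E|f|g|h|I|dZ|k|l|m|n|O|p|k|r|s|t|V|v|w|k s|j|z" "|" with
  | some r => r
  | none => []                                      -- unreachable: the separator "|" is nonempty

-- the for-loop over enumerate(("sh", …, "qu")): each digraph collapsed to chr(i+1)
def bRepAll (w : List Char) : List Char :=
  (PySem.List.enumerate ["sh", "ch", "th", "ph", "wh", "ng", "qu"]).foldl
    (fun acc p => PySem.Chars.replace acc p.2.toList [Char.ofNat (p.1 + 1).toNat]) w

-- body of the output loop: j = _KEYS.find(ch); if j >= 0: out += _VALS[j].split()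
def bStep (c : Char) : List String :=
  let j := PySem.Chars.find bKeys [c]
  if 0 ≤ j then
    match PySem.List.pyGet? bVals j with
    | some v => PySem.Str.split₀ v
    | none => []                                    -- unreachable: find's index is within _VALS
  else []

def bConsonants : List Char := "bcdfghjklmnpqrstvwxz".toList
def bVowels : List Char := "aeiouy".toList

-- hand port of _SILENT_E.fullmatch (r"(?s).*[cons][vowel][cons]e"): exact — it holds iff
-- the last four chars are consonant, vowel, consonant, 'e'
def bStrip (cs : List Char) : List Char :=
  match cs.reverse with
  | 'e' :: c1 :: v2 :: c3 :: _ =>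
      if c3 ∈ bConsonants ∧ v2 ∈ bVowels ∧ c1 ∈ bConsonants then cs.dropLast else cs
  | _ => cs

def fallback_spell_out_py_alt (word : String) (voice : String) : List String :=
  (bRepAll (bStrip word.toList)).foldl (fun out c => out ++ bStep c) []

-- ===== PRECONDITION & SPEC =====
def Spec_fallback_spell_out_py (word : String) (voice : String) (out : List String) : Prop := out = fallback_spell_out_py_alt word voice
instance (word : String) (voice : String) (out : List String) : Decidable (Spec_fallback_spell_out_py word voice out) := by unfold Spec_fallback_spell_out_py; infer_instance

-- ===== CLAIM (what is proved, stated in full; the proofs are below) =====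
def Claim_equal_fallback_spell_out_py : Prop := ∀ (word : String) (voice : String), Dom_fallback_spell_out_py word voice → Spec_fallback_spell_out_py word voice (fallback_spell_out_py word voice)

-- ===== LEMMAS AND PROOFS =====

-- ---- the silent-e strippers agree ----
theorem endswith_not_e (cs : List Char) (a : Char) (t : List Char) (h : cs.reverse = a :: t)
    (ha : a ≠ 'e') : PySem.Chars.endswith cs ['e'] = false := by
  rw [← Bool.not_eq_true, PySem.Chars.endswith_iff]
  rw [← List.reverse_prefix]
  simp only [List.reverse_cons, List.reverse_nil, List.nil_append, h,
    List.cons_prefix_iff]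
  rintro ⟨l', heq, -⟩
  exact ha (List.cons_eq_cons.mp heq).1

theorem strip_len_lt (cs : List Char) (h : cs.length < 4) : aStrip cs = bStrip cs := by
  unfold aStrip bStrip
  rw [if_pos (Or.inl h)]
  rcases hrv : cs.reverse with _ | ⟨a, _ | ⟨b, _ | ⟨c, _ | ⟨d, t⟩⟩⟩⟩
  · rfl
  · split <;> simp_all
  · split <;> simp_all
  · split <;> simp_all
  · exfalso; have := congrArg List.length hrv; simp at this; omega

theorem strip_eq (cs : List Char) : aStrip cs = bStrip cs := by
  by_cases hl : cs.length < 4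
  · exact strip_len_lt cs hl
  rcases hrv : cs.reverse with _ | ⟨a, _ | ⟨b, _ | ⟨c, _ | ⟨d, t⟩⟩⟩⟩
  case neg.nil => exact absurd (by have := congrArg List.length hrv; simpa using this; ) (by simp_all)
  case neg.cons.nil => exact absurd (by have := congrArg List.length hrv; simpa using this) (by omega)
  case neg.cons.cons.nil => exact absurd (by have := congrArg List.length hrv; simpa using this) (by omega)
  case neg.cons.cons.cons.nil => exact absurd (by have := congrArg List.length hrv; simpa using this) (by omega)
  by_cases ha : a = 'e'
  · subst ha
    have hcs : cs = t.reverse ++ [d, c, b, 'e'] := by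
      have := congrArg List.reverse hrv; simpa using this
    subst hcs
    unfold aStrip bStrip
    have hlen : (t.reverse ++ [d, c, b, 'e']).length = t.length + 4 := by simp
    have hend : PySem.Chars.endswith (t.reverse ++ [d, c, b, 'e']) ['e'] = true :=
      (PySem.Chars.endswith_iff _ _).mpr ⟨t.reverse ++ [d, c, b], by simp⟩
    rw [if_neg (by simp [hlen, hend])]
    have g2 : PySem.List.pyGet? (t.reverse ++ [d, c, b, 'e']) (-2) = some b := by
      rw [PySem.List.pyGet?_neg_ofNat _ 2 (by omega) (by simp)]
      rw [List.getElem?_append_right (by simp)]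
      simp
    have g3 : PySem.List.pyGet? (t.reverse ++ [d, c, b, 'e']) (-3) = some c := by
      rw [PySem.List.pyGet?_neg_ofNat _ 3 (by omega) (by simp)]
      rw [List.getElem?_append_right (by simp)]
      simp
    have g4 : PySem.List.pyGet? (t.reverse ++ [d, c, b, 'e']) (-4) = some d := by
      rw [PySem.List.pyGet?_neg_ofNat _ 4 (by omega) (by simp)]
      rw [List.getElem?_append_right (by simp)]
      simp
    rw [g2, g3, g4]
    have hrev : (t.reverse ++ [d, c, b, 'e']).reverse = 'e' :: b :: c :: d :: t := by simp
    rw [hrev]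
    simp only [PySem.List.slice_to_neg_one, aConsonants, aVowels, bConsonants, bVowels,
      PySem.Set.mem_ofList]
    rfl
  · unfold aStrip bStrip
    rw [if_pos (Or.inr (endswith_not_e cs a _ hrv ha))]
    rw [hrv]
    rcases Decidable.em (a = 'e') with h | h
    · exact absurd h ha
    · simp [h]

theorem bStrip_subset (cs : List Char) : ∀ c ∈ bStrip cs, c ∈ cs := by
  unfold bStrip
  split
  · split
    · exact fun c hc => List.mem_of_mem_dropLast hc
    · exact fun c hc => hc
  · exact fun c hc => hc

-- ---- a clean recursion equal to PySem.Chars.replace for a 2-char pattern, 1-char replacement ----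
def repc (x y m : Char) : List Char → List Char
  | [] => []
  | [a] => [a]
  | a :: b :: t => if a = x ∧ b = y then m :: repc x y m t else a :: repc x y m (b :: t)
  termination_by l => l.length
  decreasing_by
    · simp only [List.length_cons]; omega
    · simp only [List.length_cons]; omega

theorem replace_go_eq (x y m : Char) (fuel : Nat) :
    ∀ (l acc : List Char), l.length ≤ fuel →
      PySem.Chars.replace.go [x, y] [m] fuel l acc = acc.reverse ++ repc x y m l := by
  induction fuel with
  | zero =>
    intro l acc hl
    have : l = [] := by cases l <;> simp_all
    subst this
    simp [PySem.Chars.replace.go, repc]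
  | succ fuel ih =>
    intro l acc hl
    match l with
    | [] => simp [PySem.Chars.replace.go, repc]
    | c :: t =>
      rw [PySem.Chars.replace.go]
      match t with
      | [] =>
        have hpre : List.isPrefixOf [x, y] [c] = false := by
          simp [List.isPrefixOf]
        simp only [hpre, Bool.false_eq_true, if_false]
        rw [ih [] (c :: acc) (by simp)]
        simp [repc]
      | b :: t' =>
        by_cases hm : c = x ∧ b = y
        · obtain ⟨rfl, rfl⟩ := hm
          have hpre : List.isPrefixOf [c, b] (c :: b :: t') = true :=
            List.isPrefixOf_iff_prefix.mpr ⟨t', rfl⟩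
          simp only [hpre, if_true]
          have hdrop : List.drop [c, b].length (c :: b :: t') = t' := rfl
          rw [hdrop, ih t' ([m].reverse ++ acc) (by simp at hl ⊢; omega)]
          simp [repc]
        · have hpre : List.isPrefixOf [x, y] (c :: b :: t') = false := by
            rw [Bool.eq_false_iff]
            intro hp
            have hpp := List.isPrefixOf_iff_prefix.mp hp
            rcases List.cons_prefix_iff.mp hpp with ⟨l2, heq, hy⟩
            rcases List.cons_eq_cons.mp heq with ⟨hc, hl2⟩
            subst hl2
            rcases List.cons_prefix_iff.mp hy with ⟨l3, heq2, -⟩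
            rcases List.cons_eq_cons.mp heq2 with ⟨hb, -⟩
            exact hm ⟨hc, hb⟩
          simp only [hpre, Bool.false_eq_true, if_false]
          rw [ih (b :: t') (c :: acc) (by simp at hl ⊢; omega)]
          have : repc x y m (c :: b :: t') = c :: repc x y m (b :: t') := by
            rw [repc]; simp [hm]
          rw [this]
          simp

theorem replace_eq_repc (x y m : Char) (s : List Char) :
    PySem.Chars.replace s [x, y] [m] = repc x y m s := by
  rw [PySem.Chars.replace]
  simp only [List.isEmpty_cons, Bool.false_eq_true, if_false]
  exact replace_go_eq x y m s.length s [] le_rfl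

-- bRepAll written as the composition of the seven clean recursions
theorem bRepAll_eq (w : List Char) :
    bRepAll w =
      repc 'q' 'u' (Char.ofNat 7) (repc 'n' 'g' (Char.ofNat 6) (repc 'w' 'h' (Char.ofNat 5)
        (repc 'p' 'h' (Char.ofNat 4) (repc 't' 'h' (Char.ofNat 3) (repc 'c' 'h' (Char.ofNat 2)
          (repc 's' 'h' (Char.ofNat 1) w)))))) := by
  show PySem.Chars.replace (PySem.Chars.replace (PySem.Chars.replace (PySem.Chars.replace
    (PySem.Chars.replace (PySem.Chars.replace (PySem.Chars.replace w
      "sh".toList [Char.ofNat 1]) "ch".toList [Char.ofNat 2]) "th".toList [Char.ofNat 3])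
      "ph".toList [Char.ofNat 4]) "wh".toList [Char.ofNat 5]) "ng".toList [Char.ofNat 6])
      "qu".toList [Char.ofNat 7] = _
  have hs : "sh".toList = ['s','h'] := by decide
  have hc : "ch".toList = ['c','h'] := by decide
  have ht : "th".toList = ['t','h'] := by decide
  have hp : "ph".toList = ['p','h'] := by decide
  have hw : "wh".toList = ['w','h'] := by decide
  have hn : "ng".toList = ['n','g'] := by decide
  have hq : "qu".toList = ['q','u'] := by decide
  rw [hs, hc, ht, hp, hw, hn, hq]
  rw [replace_eq_repc, replace_eq_repc, replace_eq_repc, replace_eq_repc,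
    replace_eq_repc, replace_eq_repc, replace_eq_repc]

-- ---- small facts about repc ----
theorem repc_nil (x y m : Char) : repc x y m [] = [] := by rw [repc]

theorem repc_one (x y m a : Char) : repc x y m [a] = [a] := by rw [repc]

theorem repc_match (x y m : Char) (t : List Char) :
    repc x y m (x :: y :: t) = m :: repc x y m t := by
  rw [repc]; simp

theorem repc_skip (x y m a : Char) (t : List Char) (h : ¬(a = x ∧ t.head? = some y)) :
    repc x y m (a :: t) = a :: repc x y m t := by
  match t with
  | [] => rw [repc_one, repc_nil]
  | b :: t' =>
    rw [repc]
    have : ¬(a = x ∧ b = y) := by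
      rintro ⟨rfl, rfl⟩; exact h ⟨rfl, rfl⟩
    simp [this]

theorem repc_skip2 (x y m a b : Char) (t : List Char) (hab : ¬(a = x ∧ b = y)) (hb : b ≠ x) :
    repc x y m (a :: b :: t) = a :: b :: repc x y m t := by
  rw [repc_skip x y m a (b :: t) (by rintro ⟨rfl, hh⟩; simp at hh; exact hab ⟨rfl, hh⟩)]
  rw [repc_skip x y m b t (by rintro ⟨rfl, -⟩; exact hb rfl)]

theorem repc_head (x y m : Char) (l : List Char) :
    (repc x y m l).head? = l.head? ∨ (repc x y m l).head? = some m := by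
  match l with
  | [] => left; rw [repc_nil]
  | [a] => left; rw [repc_one]
  | a :: b :: t =>
    rw [repc]
    by_cases h : a = x ∧ b = y
    · right; simp [h]
    · left; simp [h]

-- head stays the original head or becomes a marker (code < 8)
theorem repc_Q (x y m : Char) (hm : m.toNat < 8) (d : Char) (l : List Char)
    (hQ : l.head? = some d ∨ ∃ e, l.head? = some e ∧ e.toNat < 8) :
    (repc x y m l).head? = some d ∨ ∃ e, (repc x y m l).head? = some e ∧ e.toNat < 8 := by
  rcases repc_head x y m l with h | h
  · rw [h]; exact hQ
  · right; exact ⟨m, h, hm⟩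

-- skip one stage: the head of the tail is the original d or a marker, never h/g/u
theorem skip_stage (x y m c d : Char) (zs : List Char) (hy : 8 ≤ y.toNat)
    (hcd : ¬(c = x ∧ d = y))
    (hQ : zs.head? = some d ∨ ∃ e, zs.head? = some e ∧ e.toNat < 8) :
    repc x y m (c :: zs) = c :: repc x y m zs := by
  apply repc_skip
  rintro ⟨rfl, hh⟩
  rcases hQ with h | ⟨e, he, hlt⟩
  · rw [hh] at h
    have hyd : y = d := by injection h
    exact hcd ⟨rfl, hyd.symm⟩
  · rw [hh] at he
    have hye : y = e := by injection he
    subst hye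
    omega

-- the seven digraph pairs, as used by the case split of the main lemma
def digraphPairs : List (List Char) :=
  [['s','h'], ['c','h'], ['t','h'], ['p','h'], ['w','h'], ['n','g'], ['q','u']]

theorem adg_mk : aDigraphs = PySem.Dict.mk
  [(['s','h'], ["S"]), (['c','h'], ["tS"]), (['t','h'], ["T"]), (['p','h'], ["f"]),
   (['w','h'], ["w"]), (['n','g'], ["N"]), (['q','u'], ["k", "w"])] := by decide

theorem adg_single (c : Char) : aDigraphs.get? [c] = none := by
  rw [adg_mk]; simp [PySem.Dict.get?]

theorem adg_none (c d : Char) (h : [c, d] ∉ digraphPairs) : aDigraphs.get? [c, d] = none := by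
  rw [adg_mk]
  simp only [digraphPairs, List.mem_cons, List.not_mem_nil, or_false] at h
  push Not at h
  obtain ⟨h1, h2, h3, h4, h5, h6, h7⟩ := h
  simp [PySem.Dict.get?, Ne.symm h1, Ne.symm h2, Ne.symm h3,
    Ne.symm h4, Ne.symm h5, Ne.symm h6, Ne.symm h7]

theorem pair_ne (c d x y : Char) (h : [c, d] ∉ digraphPairs) (hx : [x, y] ∈ digraphPairs) :
    ¬(c = x ∧ d = y) := by
  rintro ⟨rfl, rfl⟩; exact h hx

-- B skips a non-digraph head character unchanged through all seven passes
theorem repAll_skip (c d : Char) (rest : List Char) (hnd : [c, d] ∉ digraphPairs) :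
    bRepAll (c :: d :: rest) = c :: bRepAll (d :: rest) := by
  rw [bRepAll_eq, bRepAll_eq]
  have q0 : (d :: rest).head? = some d ∨ ∃ e, (d :: rest).head? = some e ∧ e.toNat < 8 :=
    Or.inl rfl
  have q1 := repc_Q 's' 'h' (Char.ofNat 1) (by decide) d _ q0
  have q2 := repc_Q 'c' 'h' (Char.ofNat 2) (by decide) d _ q1
  have q3 := repc_Q 't' 'h' (Char.ofNat 3) (by decide) d _ q2
  have q4 := repc_Q 'p' 'h' (Char.ofNat 4) (by decide) d _ q3
  have q5 := repc_Q 'w' 'h' (Char.ofNat 5) (by decide) d _ q4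
  have q6 := repc_Q 'n' 'g' (Char.ofNat 6) (by decide) d _ q5
  rw [skip_stage 's' 'h' (Char.ofNat 1) c d _ (by decide) (pair_ne c d _ _ hnd (by decide)) q0]
  rw [skip_stage 'c' 'h' (Char.ofNat 2) c d _ (by decide) (pair_ne c d _ _ hnd (by decide)) q1]
  rw [skip_stage 't' 'h' (Char.ofNat 3) c d _ (by decide) (pair_ne c d _ _ hnd (by decide)) q2]
  rw [skip_stage 'p' 'h' (Char.ofNat 4) c d _ (by decide) (pair_ne c d _ _ hnd (by decide)) q3]
  rw [skip_stage 'w' 'h' (Char.ofNat 5) c d _ (by decide) (pair_ne c d _ _ hnd (by decide)) q4]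
  rw [skip_stage 'n' 'g' (Char.ofNat 6) c d _ (by decide) (pair_ne c d _ _ hnd (by decide)) q5]
  rw [skip_stage 'q' 'u' (Char.ofNat 7) c d _ (by decide) (pair_ne c d _ _ hnd (by decide)) q6]

-- B rewrites each digraph to its marker, once, at the head
theorem repAll_sh (rest : List Char) : bRepAll ('s' :: 'h' :: rest) = Char.ofNat 1 :: bRepAll rest := by
  rw [bRepAll_eq, bRepAll_eq, repc_match]
  rw [repc_skip 'c' 'h' (Char.ofNat 2) (Char.ofNat 1) _ (by rintro ⟨h, -⟩; exact absurd h (by decide))]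
  rw [repc_skip 't' 'h' (Char.ofNat 3) (Char.ofNat 1) _ (by rintro ⟨h, -⟩; exact absurd h (by decide))]
  rw [repc_skip 'p' 'h' (Char.ofNat 4) (Char.ofNat 1) _ (by rintro ⟨h, -⟩; exact absurd h (by decide))]
  rw [repc_skip 'w' 'h' (Char.ofNat 5) (Char.ofNat 1) _ (by rintro ⟨h, -⟩; exact absurd h (by decide))]
  rw [repc_skip 'n' 'g' (Char.ofNat 6) (Char.ofNat 1) _ (by rintro ⟨h, -⟩; exact absurd h (by decide))]
  rw [repc_skip 'q' 'u' (Char.ofNat 7) (Char.ofNat 1) _ (by rintro ⟨h, -⟩; exact absurd h (by decide))]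

theorem repAll_ch (rest : List Char) : bRepAll ('c' :: 'h' :: rest) = Char.ofNat 2 :: bRepAll rest := by
  rw [bRepAll_eq, bRepAll_eq]
  rw [repc_skip2 's' 'h' (Char.ofNat 1) 'c' 'h' _ (by decide) (by decide), repc_match]
  rw [repc_skip 't' 'h' (Char.ofNat 3) (Char.ofNat 2) _ (by rintro ⟨h, -⟩; exact absurd h (by decide))]
  rw [repc_skip 'p' 'h' (Char.ofNat 4) (Char.ofNat 2) _ (by rintro ⟨h, -⟩; exact absurd h (by decide))]
  rw [repc_skip 'w' 'h' (Char.ofNat 5) (Char.ofNat 2) _ (by rintro ⟨h, -⟩; exact absurd h (by decide))]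
  rw [repc_skip 'n' 'g' (Char.ofNat 6) (Char.ofNat 2) _ (by rintro ⟨h, -⟩; exact absurd h (by decide))]
  rw [repc_skip 'q' 'u' (Char.ofNat 7) (Char.ofNat 2) _ (by rintro ⟨h, -⟩; exact absurd h (by decide))]

theorem repAll_th (rest : List Char) : bRepAll ('t' :: 'h' :: rest) = Char.ofNat 3 :: bRepAll rest := by
  rw [bRepAll_eq, bRepAll_eq]
  rw [repc_skip2 's' 'h' (Char.ofNat 1) 't' 'h' _ (by decide) (by decide)]
  rw [repc_skip2 'c' 'h' (Char.ofNat 2) 't' 'h' _ (by decide) (by decide), repc_match]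
  rw [repc_skip 'p' 'h' (Char.ofNat 4) (Char.ofNat 3) _ (by rintro ⟨h, -⟩; exact absurd h (by decide))]
  rw [repc_skip 'w' 'h' (Char.ofNat 5) (Char.ofNat 3) _ (by rintro ⟨h, -⟩; exact absurd h (by decide))]
  rw [repc_skip 'n' 'g' (Char.ofNat 6) (Char.ofNat 3) _ (by rintro ⟨h, -⟩; exact absurd h (by decide))]
  rw [repc_skip 'q' 'u' (Char.ofNat 7) (Char.ofNat 3) _ (by rintro ⟨h, -⟩; exact absurd h (by decide))]

theorem repAll_ph (rest : List Char) : bRepAll ('p' :: 'h' :: rest) = Char.ofNat 4 :: bRepAll rest := by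
  rw [bRepAll_eq, bRepAll_eq]
  rw [repc_skip2 's' 'h' (Char.ofNat 1) 'p' 'h' _ (by decide) (by decide)]
  rw [repc_skip2 'c' 'h' (Char.ofNat 2) 'p' 'h' _ (by decide) (by decide)]
  rw [repc_skip2 't' 'h' (Char.ofNat 3) 'p' 'h' _ (by decide) (by decide), repc_match]
  rw [repc_skip 'w' 'h' (Char.ofNat 5) (Char.ofNat 4) _ (by rintro ⟨h, -⟩; exact absurd h (by decide))]
  rw [repc_skip 'n' 'g' (Char.ofNat 6) (Char.ofNat 4) _ (by rintro ⟨h, -⟩; exact absurd h (by decide))]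
  rw [repc_skip 'q' 'u' (Char.ofNat 7) (Char.ofNat 4) _ (by rintro ⟨h, -⟩; exact absurd h (by decide))]

theorem repAll_wh (rest : List Char) : bRepAll ('w' :: 'h' :: rest) = Char.ofNat 5 :: bRepAll rest := by
  rw [bRepAll_eq, bRepAll_eq]
  rw [repc_skip2 's' 'h' (Char.ofNat 1) 'w' 'h' _ (by decide) (by decide)]
  rw [repc_skip2 'c' 'h' (Char.ofNat 2) 'w' 'h' _ (by decide) (by decide)]
  rw [repc_skip2 't' 'h' (Char.ofNat 3) 'w' 'h' _ (by decide) (by decide)]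
  rw [repc_skip2 'p' 'h' (Char.ofNat 4) 'w' 'h' _ (by decide) (by decide), repc_match]
  rw [repc_skip 'n' 'g' (Char.ofNat 6) (Char.ofNat 5) _ (by rintro ⟨h, -⟩; exact absurd h (by decide))]
  rw [repc_skip 'q' 'u' (Char.ofNat 7) (Char.ofNat 5) _ (by rintro ⟨h, -⟩; exact absurd h (by decide))]

theorem repAll_ng (rest : List Char) : bRepAll ('n' :: 'g' :: rest) = Char.ofNat 6 :: bRepAll rest := by
  rw [bRepAll_eq, bRepAll_eq]
  rw [repc_skip2 's' 'h' (Char.ofNat 1) 'n' 'g' _ (by decide) (by decide)]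
  rw [repc_skip2 'c' 'h' (Char.ofNat 2) 'n' 'g' _ (by decide) (by decide)]
  rw [repc_skip2 't' 'h' (Char.ofNat 3) 'n' 'g' _ (by decide) (by decide)]
  rw [repc_skip2 'p' 'h' (Char.ofNat 4) 'n' 'g' _ (by decide) (by decide)]
  rw [repc_skip2 'w' 'h' (Char.ofNat 5) 'n' 'g' _ (by decide) (by decide), repc_match]
  rw [repc_skip 'q' 'u' (Char.ofNat 7) (Char.ofNat 6) _ (by rintro ⟨h, -⟩; exact absurd h (by decide))]

theorem repAll_qu (rest : List Char) : bRepAll ('q' :: 'u' :: rest) = Char.ofNat 7 :: bRepAll rest := by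
  rw [bRepAll_eq, bRepAll_eq]
  rw [repc_skip2 's' 'h' (Char.ofNat 1) 'q' 'u' _ (by decide) (by decide)]
  rw [repc_skip2 'c' 'h' (Char.ofNat 2) 'q' 'u' _ (by decide) (by decide)]
  rw [repc_skip2 't' 'h' (Char.ofNat 3) 'q' 'u' _ (by decide) (by decide)]
  rw [repc_skip2 'p' 'h' (Char.ofNat 4) 'q' 'u' _ (by decide) (by decide)]
  rw [repc_skip2 'w' 'h' (Char.ofNat 5) 'q' 'u' _ (by decide) (by decide)]
  rw [repc_skip2 'n' 'g' (Char.ofNat 6) 'q' 'u' _ (by decide) (by decide), repc_match]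

theorem repAll_nil : bRepAll [] = [] := by
  rw [bRepAll_eq]
  simp [repc_nil]

theorem repAll_one (c : Char) : bRepAll [c] = [c] := by
  rw [bRepAll_eq]
  simp [repc_one]

-- ---- per-character lookup: B's find/split table agrees with A's single-letter dict ----
set_option maxRecDepth 40000 in
theorem step_single_range : ∀ n ∈ List.range 127,
    pvDomChar (Char.ofNat n) = true → bStep (Char.ofNat n) = aSingle.getD [Char.ofNat n] [] := by
  decide

theorem step_single (c : Char) (h : pvDomChar c = true) : bStep c = aSingle.getD [c] [] := by
  have hlt : c.toNat < 127 := by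
    simp only [pvDomChar, Bool.or_eq_true, Bool.and_eq_true, decide_eq_true_eq,
      beq_iff_eq] at h
    omega
  have := step_single_range c.toNat (List.mem_range.mpr hlt)
  rw [Char.ofNat_toNat] at this
  exact this h

-- ---- the main correspondence on marker-free strings ----
theorem main_loop (cs : List Char) (hdom : ∀ c ∈ cs, pvDomChar c = true) :
    aLoop cs = (bRepAll cs).flatMap bStep := by
  induction hn : cs.length using Nat.strong_induction_on generalizing cs with
  | _ n ih =>
  match cs with
  | [] => simp [aLoop, repAll_nil]
  | [c] =>
    rw [aLoop]
    simp only [List.take, adg_single, repAll_one, List.flatMap_cons, List.flatMap_nil,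
      List.append_nil]
    rw [aLoop]
    rw [step_single c (hdom c (by simp))]
    simp
  | c :: d :: rest =>
    rw [aLoop]
    have htake : List.take 2 (c :: d :: rest) = [c, d] := by simp
    by_cases hd : [c, d] ∈ digraphPairs
    · have hrep : ∃ ps m, aDigraphs.get? [c, d] = some ps ∧
          bRepAll (c :: d :: rest) = m :: bRepAll rest ∧ bStep m = ps := by
        simp only [digraphPairs, List.mem_cons, List.not_mem_nil, or_false] at hd
        rcases hd with h | h | h | h | h | h | h
        all_goals rw [show c = _ from congrArg (fun l => l.headI) h,
          show d = _ from congrArg (fun l => l.tail.headI) h]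
        · exact ⟨["S"], Char.ofNat 1, by decide, repAll_sh rest, by decide⟩
        · exact ⟨["tS"], Char.ofNat 2, by decide, repAll_ch rest, by decide⟩
        · exact ⟨["T"], Char.ofNat 3, by decide, repAll_th rest, by decide⟩
        · exact ⟨["f"], Char.ofNat 4, by decide, repAll_ph rest, by decide⟩
        · exact ⟨["w"], Char.ofNat 5, by decide, repAll_wh rest, by decide⟩
        · exact ⟨["N"], Char.ofNat 6, by decide, repAll_ng rest, by decide⟩
        · exact ⟨["k", "w"], Char.ofNat 7, by decide, repAll_qu rest, by decide⟩
      rcases hrep with ⟨ps, m, hg, hb, hs⟩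
      simp only [htake, hg, hb, List.flatMap_cons, hs, List.drop_one, List.tail_cons]
      rw [ih rest.length (by simp at hn; omega) rest
        (fun c hc => hdom c (by simp [hc])) rfl]
    · rw [repAll_skip c d rest hd]
      simp only [htake, adg_none c d hd, List.flatMap_cons]
      rw [step_single c (hdom c (by simp))]
      rw [ih (d :: rest).length (by simp at hn ⊢; omega) (d :: rest)
        (fun e he => hdom e (by simp at he ⊢; tauto)) rfl]

-- ===== VERDICT (by name: the statement is the Claim_ definition above) =====
theorem fallback_spell_out_py_spec : Claim_equal_fallback_spell_out_py := by
  intro word voice hdom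
  unfold Spec_fallback_spell_out_py fallback_spell_out_py fallback_spell_out_py_alt
  rw [strip_eq]
  have hall : ∀ c ∈ bStrip word.toList, pvDomChar c = true := by
    intro c hc
    have hw : pvDomStr word = true := by
      unfold Dom_fallback_spell_out_py at hdom
      simp at hdom
      exact hdom.1
    have := bStrip_subset word.toList c hc
    exact List.all_eq_true.mp hw c (by simpa using this)
  rw [PySem.List.foldl_append_eq_flatMap bStep (bRepAll (bStrip word.toList)) []]
  rw [main_loop _ hall]
  simp
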